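-- pv_equiv track=rewrite | github.com/emmapowers/trellis | examples/widget_showcase/example.py | _add_component_decorator
-- ===== SOURCE A (Python) =====
-- def _add_component_decorator(source: str) -> str:
--     """Add @component decorator to the function definition."""
--     lines = source.split("\n")
--     result = []
--     for line in lines:
--         if line.lstrip().startswith("def "):
--             result.append("@component")
--         result.append(line)
--     return "\n".join(result)
-- ===== SOURCE B (Python) =====
-- def _add_component_decorator(source: str) -> str:
--     """Add @component decorator to the function definition."""
--     # Single index-based scan over the string: per line, skip horizontal
--     # whitespace, test for "def ", and emit segments directly -- no
--     # split/join round-trip and no per-line intermediate list of lines.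
--     pieces = []
--     i, n = 0, len(source)
--     while i <= n:
--         j = i
--         while j < n and source[j] != "\n" and source[j].isspace():
--             j += 1
--         decorated = source[j:j + 4] == "def "
--         k = j
--         while k < n and source[k] != "\n":
--             k += 1
--         if decorated:
--             pieces.append("@component\n")
--         pieces.append(source[i:k])
--         if k < n:
--             pieces.append("\n")
--         i = k + 1
--     return "".join(pieces)
-- ===== Notes on version B (the rewrite author's own statement) =====
-- stated objective: alternative
-- what changed: Replaced the split-on-newline / per-line list / join pipeline with a single index-based scan that skips leading horizontal whitespace, tests the four-character function-keyword slice, and emits output segments directly.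
import Mathlib
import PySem

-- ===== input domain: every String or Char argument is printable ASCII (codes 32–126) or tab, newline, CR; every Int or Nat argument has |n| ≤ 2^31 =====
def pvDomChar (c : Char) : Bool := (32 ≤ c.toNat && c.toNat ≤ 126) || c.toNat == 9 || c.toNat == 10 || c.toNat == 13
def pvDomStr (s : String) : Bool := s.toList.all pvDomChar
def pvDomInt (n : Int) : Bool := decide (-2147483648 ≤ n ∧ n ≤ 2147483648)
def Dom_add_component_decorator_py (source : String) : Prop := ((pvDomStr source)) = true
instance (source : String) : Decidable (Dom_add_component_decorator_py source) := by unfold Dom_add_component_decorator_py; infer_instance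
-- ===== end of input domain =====

-- B is an alternative single-scan implementation (index-based segment emission instead of split/join); return values proved equal on all inputs of the domain.

-- ===== PORT A =====
-- literal transliteration of A at the code-point level: split("\n"), per-line
-- lstrip().startswith("def "), appending to a result list, "\n".join.
def add_component_decorator_py (source : String) : String :=
  let lines : List (List Char) := PySem.Chars.splitOn source.toList "\n".toList
  let result : List (List Char) := lines.foldl
    (fun acc line =>
      (if PySem.Chars.startswith (PySem.Chars.lstrip line) "def ".toList
       then acc ++ ["@component".toList] else acc) ++ [line]) []
  String.mk (PySem.Chars.join "\n".toList result)

-- ===== PORT B =====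
-- B-side helpers: the three while loops of Source B as index recursions
-- (`le_pvSkipWs`/`le_pvFindNl` are cited for termination of the outer loop).

def pvSkipWs (cs : List Char) (j : Nat) : Nat :=
  if h : j < cs.length ∧ cs[j]! ≠ '\n' ∧ PySem.Chars.isspace cs[j]! then
    pvSkipWs cs (j + 1)
  else j
termination_by cs.length - j
decreasing_by omega

def pvFindNl (cs : List Char) (k : Nat) : Nat :=
  if h : k < cs.length ∧ cs[k]! ≠ '\n' then pvFindNl cs (k + 1) else k
termination_by cs.length - k
decreasing_by omega

theorem le_pvSkipWs (cs : List Char) (j : Nat) : j ≤ pvSkipWs cs j := by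
  unfold pvSkipWs
  split
  · exact le_trans (Nat.le_succ j) (le_pvSkipWs cs (j + 1))
  · exact le_refl j
termination_by cs.length - j
decreasing_by rename_i h; omega

theorem le_pvFindNl (cs : List Char) (k : Nat) : k ≤ pvFindNl cs k := by
  unfold pvFindNl
  split
  · exact le_trans (Nat.le_succ k) (le_pvFindNl cs (k + 1))
  · exact le_refl k
termination_by cs.length - k
decreasing_by rename_i h; omega

def pvBLoop (cs : List Char) (i : Nat) : List Char :=
  if i ≤ cs.length then
    let j := pvSkipWs cs i
    let decorated := (List.take 4 (List.drop j cs)) == "def ".toList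
    let k := pvFindNl cs j
    (if decorated then "@component\n".toList else []) ++
      (List.take (k - i) (List.drop i cs)) ++
      (if h : k < cs.length then '\n' :: pvBLoop cs (k + 1) else [])
  else []
termination_by cs.length + 1 - i
decreasing_by
  have h1 := le_pvSkipWs cs i
  have h2 := le_pvFindNl cs (pvSkipWs cs i)
  omega


def add_component_decorator_py_alt (source : String) : String :=
  String.mk (pvBLoop source.toList 0)

-- ===== PRECONDITION & SPEC =====
def Spec_add_component_decorator_py (source : String) (out : String) : Prop := out = add_component_decorator_py_alt source
instance (source : String) (out : String) : Decidable (Spec_add_component_decorator_py source out) := by unfold Spec_add_component_decorator_py; infer_instance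

-- ===== CLAIM (what is proved, stated in full; the proofs are below) =====
def Claim_equal_add_component_decorator_py : Prop := ∀ (source : String), Dom_add_component_decorator_py source → Spec_add_component_decorator_py source (add_component_decorator_py source)

-- ===== LEMMAS AND PROOFS =====
def pvWsP (c : Char) : Bool := c != '\n' && PySem.Chars.isspace c
def pvNlP (c : Char) : Bool := c != '\n'

theorem getBang_of_drop (cs : List Char) (i : Nat) (c : Char) (r : List Char)
    (h : cs.drop i = c :: r) : i < cs.length ∧ cs[i]! = c ∧ cs.drop (i + 1) = r := by
  have hi : i < cs.length := by
    by_contra hle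
    rw [List.drop_eq_nil_iff.mpr (by omega)] at h; simp at h
  have h0 : cs[i]? = some c := by
    have := @List.getElem?_drop Char cs i 0
    rw [h] at this; simpa using this.symm
  refine ⟨hi, ?_, ?_⟩
  · have : cs[i]! = cs[i] := getElem!_pos cs i hi
    rw [this]; exact Option.some_injective _ (by rw [← List.getElem?_eq_getElem hi, h0])
  · have := @List.getElem?_drop Char cs i 0
    have h1 : cs.drop (i+1) = (cs.drop i).drop 1 := by rw [List.drop_drop]
    rw [h1, h]; rfl

theorem pvSkipWs_eq (cs : List Char) (l : List Char) : ∀ (i : Nat), cs.drop i = l →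
    pvSkipWs cs i = i + (l.takeWhile pvWsP).length := by
  induction l with
  | nil =>
    intro i h
    have hlen : cs.length ≤ i := List.drop_eq_nil_iff.mp h
    rw [pvSkipWs, dif_neg (by intro hc; omega)]
    simp
  | cons c r ih =>
    intro i h
    obtain ⟨hi, hg, hd⟩ := getBang_of_drop cs i c r h
    rw [pvSkipWs]
    by_cases hc : c ≠ '\n' ∧ PySem.Chars.isspace c
    · rw [dif_pos (by rw [hg]; exact ⟨hi, hc.1, hc.2⟩)]
      rw [ih (i+1) hd]
      have : pvWsP c = true := by simp [pvWsP, hc.1, hc.2]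
      simp [List.takeWhile_cons, this]; omega
    · rw [dif_neg (by rw [hg]; intro hx; exact hc ⟨hx.2.1, hx.2.2⟩)]
      have : pvWsP c = false := by
        simp [pvWsP]; intro h1; by_contra h2
        exact hc ⟨h1, by simpa using h2⟩
      simp [List.takeWhile_cons, this]

theorem pvFindNl_eq (cs : List Char) (l : List Char) : ∀ (k : Nat), cs.drop k = l →
    pvFindNl cs k = k + (l.takeWhile pvNlP).length := by
  induction l with
  | nil =>
    intro k h
    have hlen : cs.length ≤ k := List.drop_eq_nil_iff.mp h
    rw [pvFindNl, dif_neg (by intro hc; omega)]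
    simp
  | cons c r ih =>
    intro k h
    obtain ⟨hk, hg, hd⟩ := getBang_of_drop cs k c r h
    rw [pvFindNl]
    by_cases hc : c = '\n'
    · rw [dif_neg (by rw [hg]; intro hx; exact hx.2 hc)]
      simp [List.takeWhile_cons, pvNlP, hc]
    · rw [dif_pos (by rw [hg]; exact ⟨hk, hc⟩)]
      rw [ih (k+1) hd]
      simp [List.takeWhile_cons, pvNlP, hc]; omega

def pvHit (l : List Char) : Bool :=
  PySem.Chars.startswith (PySem.Chars.lstrip l) "def ".toList

theorem dw_eq_drop (p : Char → Bool) (l : List Char) :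
    l.dropWhile p = l.drop ((l.takeWhile p).length) := by
  induction l with
  | nil => simp
  | cons c r ih => by_cases h : p c <;> simp [h, ih]

theorem takeWhile_split (p q : Char → Bool) (hpq : ∀ c, p c = true → q c = true)
    (l : List Char) :
    l.takeWhile q = l.takeWhile p ++ (l.dropWhile p).takeWhile q := by
  induction l with
  | nil => simp
  | cons c r ih =>
    by_cases h : p c
    · simp [h, hpq c h, ih]
    · simp [h]

theorem dropWhile_head_false (p : Char → Bool) (l : List Char) (c : Char) (r : List Char)
    (h : l.dropWhile p = c :: r) : p c = false := by
  induction l with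
  | nil => simp at h
  | cons a t ih =>
    by_cases ha : p a
    · exact ih (by simpa [ha] using h)
    · rw [List.dropWhile_cons_of_neg (by simp [ha])] at h
      cases h; simpa using ha

theorem pfx_append_iff (p l₂ w : List Char)
    (hp : ∀ c ∈ p, c ≠ '\n') (hw : w = [] ∨ w.head? = some '\n') :
    p <+: l₂ ++ w ↔ p <+: l₂ := by
  induction p generalizing l₂ with
  | nil => simp
  | cons c p' ih =>
    cases l₂ with
    | nil =>
      simp only [List.nil_append, List.nil_prefix]
      constructor
      · intro hpre
        rcases hw with rfl | hh
        · simp at hpre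
        · cases w with
          | nil => simp at hh
          | cons d w' =>
            rw [List.cons_prefix_cons] at hpre
            have hd : d = '\n' := by simpa using hh
            exact absurd (hpre.1.trans hd) (hp c (by simp))
      · intro hpre; exact absurd hpre (by simp)
    | cons a l₂' =>
      simp only [List.cons_append, List.cons_prefix_cons]
      constructor
      · rintro ⟨rfl, h2⟩; exact ⟨rfl, (ih l₂' (fun x hx => hp x (by simp [hx]))).mp h2⟩
      · rintro ⟨rfl, h2⟩; exact ⟨rfl, (ih l₂' (fun x hx => hp x (by simp [hx]))).mpr h2⟩

def pvPre (c : Char) : List (List Char) → List (List Char)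
  | [] => [[c]]
  | x :: xs => (c :: x) :: xs

def pvSplit : List Char → List (List Char)
  | [] => [[]]
  | c :: r => if c = '\n' then [] :: pvSplit r else pvPre c (pvSplit r)

def pvEmit (l : List Char) : List Char :=
  (if pvHit l then "@component\n".toList else []) ++ l

def pvJoin : List (List Char) → List Char
  | [] => []
  | [l] => pvEmit l
  | l :: l' :: ls => pvEmit l ++ '\n' :: pvJoin (l' :: ls)

theorem pvSplit_ne_nil (l : List Char) : pvSplit l ≠ [] := by
  cases l with
  | nil => simp [pvSplit]
  | cons c r =>
    simp only [pvSplit]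
    split
    · simp
    · cases h : pvSplit r <;> simp [pvPre]

theorem pvSplit_no_nl (l : List Char) (h : ∀ c ∈ l, c ≠ '\n') : pvSplit l = [l] := by
  induction l with
  | nil => rfl
  | cons c r ih =>
    rw [pvSplit.eq_def]
    simp only [if_neg (h c (by simp))]
    rw [ih (fun x hx => h x (by simp [hx])), pvPre]

theorem pvSplit_append (line w' : List Char) (h : ∀ c ∈ line, c ≠ '\n') :
    pvSplit (line ++ '\n' :: w') = line :: pvSplit w' := by
  induction line with
  | nil => simp [pvSplit]
  | cons c r ih =>
    rw [List.cons_append, pvSplit.eq_def]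
    simp only [if_neg (h c (by simp))]
    rw [ih (fun x hx => h x (by simp [hx])), pvPre]

-- the big one
theorem take_of_prefix (l₁ l : List Char) (h : l₁ <+: l) : l.take l₁.length = l₁ :=
  (List.prefix_iff_eq_take.mp h).symm

set_option maxRecDepth 4000 in
theorem pvB_eq (cs : List Char) (i : Nat) (h : i ≤ cs.length) :
    pvBLoop cs i = pvJoin (pvSplit (cs.drop i)) := by
  have hj : pvSkipWs cs i = i + ((cs.drop i).takeWhile pvWsP).length :=
    pvSkipWs_eq cs (cs.drop i) i rfl
  have hvdrop : cs.drop (i + ((cs.drop i).takeWhile pvWsP).length) = (cs.drop i).dropWhile pvWsP := by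
    rw [← List.drop_drop, ← dw_eq_drop]
  have hk : pvFindNl cs (pvSkipWs cs i) =
      i + ((cs.drop i).takeWhile pvWsP).length +
        (((cs.drop i).dropWhile pvWsP).takeWhile pvNlP).length := by
    rw [hj]; exact pvFindNl_eq cs _ _ hvdrop
  have hline : (cs.drop i).takeWhile pvNlP =
      (cs.drop i).takeWhile pvWsP ++ ((cs.drop i).dropWhile pvWsP).takeWhile pvNlP :=
    takeWhile_split pvWsP pvNlP (fun c hc => by simp [pvWsP, pvNlP] at hc ⊢; exact hc.1) _
  have hkval : pvFindNl cs (pvSkipWs cs i) = i + ((cs.drop i).takeWhile pvNlP).length := by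
    rw [hk, hline]; simp [List.length_append]; omega
  have hLlen : ((cs.drop i).takeWhile pvNlP).length ≤ cs.length - i := by
    have := (List.takeWhile_prefix (l := cs.drop i) pvNlP).length_le
    simp at this; omega
  have hkle : pvFindNl cs (pvSkipWs cs i) ≤ cs.length := by omega
  have hpiece : (cs.drop i).take (pvFindNl cs (pvSkipWs cs i) - i) = (cs.drop i).takeWhile pvNlP := by
    rw [hkval]
    have : i + ((cs.drop i).takeWhile pvNlP).length - i = ((cs.drop i).takeWhile pvNlP).length := by omega
    rw [this]
    exact take_of_prefix _ _ (List.takeWhile_prefix _)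
  have hw : cs.drop (pvFindNl cs (pvSkipWs cs i)) = (cs.drop i).dropWhile pvNlP := by
    rw [hkval, ← List.drop_drop, ← dw_eq_drop]
  -- the decorated test equals A's lstrip/startswith test on the line
  have hlstrip : PySem.Chars.lstrip ((cs.drop i).takeWhile pvNlP) =
      ((cs.drop i).dropWhile pvWsP).takeWhile pvNlP := by
    rw [PySem.Chars.lstrip, hline, List.dropWhile_append]
    have hws : ((cs.drop i).takeWhile pvWsP).dropWhile PySem.Chars.isspace = [] := by
      rw [List.dropWhile_eq_nil_iff]
      intro a ha
      have := List.mem_takeWhile_imp ha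
      simp [pvWsP] at this; exact this.2
    rw [hws]
    simp only [List.isEmpty_nil, if_true]
    cases hv : (cs.drop i).dropWhile pvWsP with
    | nil => simp
    | cons c w' =>
      have hc := dropWhile_head_false pvWsP _ _ _ hv
      by_cases hcn : c = '\n'
      · subst hcn; simp [List.takeWhile_cons, pvNlP]
      · have : PySem.Chars.isspace c = false := by
          simp [pvWsP, hcn] at hc; exact hc
        rw [List.takeWhile_cons, if_pos (by simp [pvNlP, hcn])]
        rw [List.dropWhile_cons_of_neg (by simp [this])]
  have hdefchars : ∀ c ∈ "def ".toList, c ≠ '\n' := by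
    have he : "def ".toList = ['d','e','f',' '] := rfl
    intro c hc
    rw [he] at hc
    simp at hc
    rcases hc with rfl|rfl|rfl|rfl <;> decide
  have hdec : (List.take 4 (List.drop (pvSkipWs cs i) cs) == "def ".toList) =
      pvHit ((cs.drop i).takeWhile pvNlP) := by
    rw [hj, hvdrop]
    rw [pvHit, PySem.Chars.startswith, hlstrip]
    rw [Bool.eq_iff_iff, beq_iff_eq, List.isPrefixOf_iff_prefix]
    have hsplit : (cs.drop i).dropWhile pvWsP =
        ((cs.drop i).dropWhile pvWsP).takeWhile pvNlP ++ ((cs.drop i).dropWhile pvWsP).dropWhile pvNlP :=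
      (List.takeWhile_append_dropWhile ..).symm
    constructor
    · intro htake
      have hpre : "def ".toList <+: (cs.drop i).dropWhile pvWsP := by
        rw [List.prefix_iff_eq_take]; exact htake.symm
      rw [hsplit] at hpre
      refine (pfx_append_iff _ _ _ hdefchars ?_).mp hpre
      cases hw2 : ((cs.drop i).dropWhile pvWsP).dropWhile pvNlP with
      | nil => exact Or.inl rfl
      | cons d r =>
        have := dropWhile_head_false pvNlP _ _ _ hw2
        simp [pvNlP] at this
        exact Or.inr (by simp [this])
    · intro hpre
      have : "def ".toList <+: (cs.drop i).dropWhile pvWsP := by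
        rw [hsplit]
        refine (pfx_append_iff _ _ _ hdefchars ?_).mpr hpre
        cases hw2 : ((cs.drop i).dropWhile pvWsP).dropWhile pvNlP with
        | nil => exact Or.inl rfl
        | cons d r =>
          have := dropWhile_head_false pvNlP _ _ _ hw2
          simp [pvNlP] at this
          exact Or.inr (by simp [this])
      exact (List.prefix_iff_eq_take.mp this).symm
  -- unfold the loop body
  rw [pvBLoop, if_pos h]
  simp only [hdec, hpiece]
  by_cases hklt : pvFindNl cs (pvSkipWs cs i) < cs.length
  · rw [dif_pos hklt]
    -- w nonempty, starts with '\n'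
    cases hwc : cs.drop (pvFindNl cs (pvSkipWs cs i)) with
    | nil =>
      exfalso; rw [List.drop_eq_nil_iff] at hwc; omega
    | cons c w' =>
      have hcnl : c = '\n' := by
        have := dropWhile_head_false pvNlP _ _ _ (hw ▸ hwc)
        simpa [pvNlP] using this
      have hdrop1 : cs.drop (pvFindNl cs (pvSkipWs cs i) + 1) = w' := by
        rw [← List.drop_drop, hwc]; rfl
      have hrec := pvB_eq cs (pvFindNl cs (pvSkipWs cs i) + 1) (by omega)
      rw [hrec, hdrop1]
      -- split cs.drop i
      have hdw : (cs.drop i).dropWhile pvNlP = c :: w' := by rw [← hw]; exact hwc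
      have hudecomp : cs.drop i = (cs.drop i).takeWhile pvNlP ++ '\n' :: w' := by
        conv_lhs => rw [← List.takeWhile_append_dropWhile (p := pvNlP) (l := cs.drop i)]
        rw [hdw, hcnl]
      conv_rhs => rw [hudecomp]
      rw [pvSplit_append _ _ (fun x hx => by
        have := List.mem_takeWhile_imp hx
        simpa [pvNlP] using this)]
      cases hps : pvSplit w' with
      | nil => exact absurd hps (pvSplit_ne_nil w')
      | cons p ps => simp [pvJoin, pvEmit]
  · rw [dif_neg hklt]
    have hkeq : pvFindNl cs (pvSkipWs cs i) = cs.length := by omega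
    have hwnil : (cs.drop i).dropWhile pvNlP = [] := by
      rw [← hw, List.drop_eq_nil_iff]; omega
    have huL : cs.drop i = (cs.drop i).takeWhile pvNlP := by
      conv_lhs => rw [← List.takeWhile_append_dropWhile (p := pvNlP) (l := cs.drop i)]
      rw [hwnil]; simp
    conv_rhs => rw [huL]
    rw [pvSplit_no_nl _ (fun x hx => by
      have := List.mem_takeWhile_imp hx
      simpa [pvNlP] using this)]
    simp [pvJoin, pvEmit]
termination_by cs.length - i
decreasing_by
  have := le_pvSkipWs cs i
  have := le_pvFindNl cs (pvSkipWs cs i)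
  omega

def pvPreL (p : List Char) : List (List Char) → List (List Char)
  | [] => [p]
  | x :: xs => (p ++ x) :: xs

theorem pvPreL_pvPre (p : List Char) (c : Char) (X : List (List Char)) :
    pvPreL p (pvPre c X) = pvPreL (p ++ [c]) X := by
  cases X <;> simp [pvPre, pvPreL]

theorem pv_go_spec (fuel : Nat) (l cur : List Char) (acc : List (List Char))
    (h : l.length ≤ fuel) :
    PySem.Chars.splitOn.go ['\n'] fuel l cur acc =
      acc.reverse ++ pvPreL cur.reverse (pvSplit l) := by
  induction fuel generalizing l cur acc with
  | zero =>
    have : l = [] := by cases l <;> simp_all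
    subst this
    simp [PySem.Chars.splitOn.go, pvSplit, pvPreL]
  | succ fuel ih =>
    cases l with
    | nil => simp [PySem.Chars.splitOn.go, pvSplit, pvPreL]
    | cons c rest =>
      simp only [PySem.Chars.splitOn.go]
      by_cases hc : c = '\n'
      · subst hc
        rw [if_pos (by simp [List.isPrefixOf])]
        rw [ih _ _ _ (by simpa using Nat.le_of_succ_le_succ (by simpa using h))]
        have hne := pvSplit_ne_nil rest
        simp only [pvSplit]
        cases hX : pvSplit rest with
        | nil => exact absurd hX hne
        | cons x xs => simp [pvPreL, hX]
      · rw [if_neg (by simp [List.isPrefixOf]; exact fun hh => (hc hh.symm).elim)]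
        rw [ih _ _ _ (by simpa using Nat.le_of_succ_le_succ (by simpa using h))]
        simp only [pvSplit, if_neg hc, List.reverse_cons]
        rw [pvPreL_pvPre]

theorem pvSplit_eq (cs : List Char) :
    PySem.Chars.splitOn cs ['\n'] = pvSplit cs := by
  unfold PySem.Chars.splitOn
  rw [pv_go_spec _ _ _ _ (by omega)]
  have := pvSplit_ne_nil cs
  cases h : pvSplit cs with
  | nil => exact absurd h this
  | cons x xs => simp [pvPreL, h]

theorem pvG_step (l : List Char) (M : List (List Char)) (hM : M ≠ []) :
    PySem.Chars.join ['\n'] (((if pvHit l then ["@component".toList] else []) ++ [l]) ++ M) =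
      pvEmit l ++ '\n' :: PySem.Chars.join ['\n'] M := by
  cases M with
  | nil => exact absurd rfl hM
  | cons m ms =>
    by_cases hh : pvHit l
    · rw [if_pos hh]
      rw [pvEmit, if_pos hh]
      simp [PySem.Chars.join_cons_cons]
    · rw [if_neg hh, pvEmit, if_neg hh]
      simp [PySem.Chars.join_cons_cons]

theorem pvJoin_flatMap (ls : List (List Char)) (h : ls ≠ []) :
    PySem.Chars.join ['\n']
      (ls.flatMap (fun l => (if pvHit l then ["@component".toList] else []) ++ [l])) =
      pvJoin ls := by
  induction ls with
  | nil => exact absurd rfl h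
  | cons l t ih =>
    cases t with
    | nil =>
      simp only [List.flatMap_cons, List.flatMap_nil, List.append_nil]
      by_cases hh : pvHit l
      · rw [if_pos hh, pvJoin, pvEmit, if_pos hh]
        simp [PySem.Chars.join_cons_cons, PySem.Chars.join_singleton]
      · rw [if_neg hh, pvJoin, pvEmit, if_neg hh]
        simp [PySem.Chars.join_singleton]
    | cons p ts =>
      rw [List.flatMap_cons, pvG_step _ _ (by simp), ih (by simp)]
      rfl

theorem pvA_eq (cs : List Char) :
    (PySem.Chars.join "\n".toList
      ((PySem.Chars.splitOn cs "\n".toList).foldl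
        (fun acc line =>
          (if PySem.Chars.startswith (PySem.Chars.lstrip line) "def ".toList
           then acc ++ ["@component".toList] else acc) ++ [line]) [])) =
      pvJoin (pvSplit cs) := by
  have hsep : "\n".toList = ['\n'] := rfl
  have hfun : (fun (acc : List (List Char)) line =>
      (if PySem.Chars.startswith (PySem.Chars.lstrip line) "def ".toList
       then acc ++ ["@component".toList] else acc) ++ [line]) =
      fun acc line => acc ++ ((if pvHit line then ["@component".toList] else []) ++ [line]) := by
    funext acc line
    rw [pvHit]
    split <;> simp
  rw [hsep, pvSplit_eq, hfun, PySem.List.foldl_append_eq_flatMap]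
  simp only [List.nil_append]
  exact pvJoin_flatMap _ (pvSplit_ne_nil cs)

-- ===== VERDICT (by name: the statement is the Claim_ definition above) =====
theorem add_component_decorator_py_spec : Claim_equal_add_component_decorator_py := by
  intro source _
  unfold Spec_add_component_decorator_py add_component_decorator_py add_component_decorator_py_alt
  simp only
  rw [pvA_eq, pvB_eq source.toList 0 (by simp)]
  simp
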